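-- pv_equiv track=rewrite | github.com/ashishgopalhattimare/Python3-Course | Competitve Codes/simpleMaze.py | traverseMaze
-- ===== SOURCE A (Python) =====
-- X = [0,0,-1,1]
--
-- Y = [-1,1,0,0]
--
-- def outOfMaze(x, limit):
--     return (x < 0 or x == limit)
--
-- def traverseMaze(maze, x, y, visited):
--
--     visited[x][y] = True
--
--     for k in range(4):
--         if outOfMaze(x+X[k], len(maze)) or outOfMaze(y+Y[k], len(maze[x])):
--             return True
--
--         elif maze[x+X[k]][y+Y[k]] != '#' and visited[x+X[k]][y+Y[k]] == False:
--             if traverseMaze(maze, x+X[k], y+Y[k], visited):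
--
--                 visited[x][y] = True
--                 return True
--
--     visited[x][y] = False
--     return False
-- ===== SOURCE B (Python) =====
-- # Iterative DFS with an explicit stack of [x, y, next-direction] frames instead of recursion;
-- # reproduces A's return value and its in-place marking of `visited` (mark on push, unmark on backtrack).
-- X = [0, 0, -1, 1]
-- Y = [-1, 1, 0, 0]
--
-- def traverseMaze(maze, x, y, visited):
--     visited[x][y] = True
--     stack = [[x, y, 0]]
--     while stack:
--         cx, cy, k = stack[-1]
--         if k >= 4:
--             visited[cx][cy] = False
--             stack.pop()
--             continue
--         stack[-1][2] = k + 1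
--         nx, ny = cx + X[k], cy + Y[k]
--         if nx < 0 or nx == len(maze) or ny < 0 or ny == len(maze[cx]):
--             return True
--         if maze[nx][ny] != '#' and visited[nx][ny] == False:
--             visited[nx][ny] = True
--             stack.append([nx, ny, 0])
--     return False
-- ===== Notes on version B (the rewrite author's own statement) =====
-- stated objective: alternative
-- what changed: A's recursive backtracking DFS is replaced by an iterative DFS driven by an explicit stack of (cell, next-direction) frames with mark-on-push / unmark-on-pop backtracking, preserving the exact neighbour order, early boundary exit, returned value and in-place visited mutation.
import Mathlib
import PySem

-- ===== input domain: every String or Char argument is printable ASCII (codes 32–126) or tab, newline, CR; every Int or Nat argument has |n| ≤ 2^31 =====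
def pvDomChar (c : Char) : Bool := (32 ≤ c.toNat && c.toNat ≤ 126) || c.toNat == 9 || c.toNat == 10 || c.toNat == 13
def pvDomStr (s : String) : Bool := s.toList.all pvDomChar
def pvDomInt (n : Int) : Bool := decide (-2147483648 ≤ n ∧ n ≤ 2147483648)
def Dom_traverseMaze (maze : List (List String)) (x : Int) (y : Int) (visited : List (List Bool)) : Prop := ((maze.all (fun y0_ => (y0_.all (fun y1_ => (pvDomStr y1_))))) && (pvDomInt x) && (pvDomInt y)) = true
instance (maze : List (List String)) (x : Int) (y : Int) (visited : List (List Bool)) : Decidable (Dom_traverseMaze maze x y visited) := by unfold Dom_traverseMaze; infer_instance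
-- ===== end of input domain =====

-- ===== PORT A =====
-- B replaces A's recursive backtracking DFS by an iterative DFS over an explicit stack of
-- (cell, next-direction) frames (objective: alternative decomposition, same return value;
-- the Python B also reproduces A's in-place mutation of `visited`, which this file's
-- theorems do not talk about — they are about the return value).
-- Shared grid primitives (used by both ports; exact on the nonnegative in-range indices
-- that occur inside Pre_; Python would raise or wrap outside them).
def XkD : Nat → Int
  | 0 => 0
  | 1 => 0
  | 2 => -1
  | _ => 1

def YkD : Nat → Int
  | 0 => -1
  | 1 => 1
  | 2 => 0
  | _ => 0

-- outOfMaze(x, limit)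
def outB (a lim : Int) : Bool := a < 0 || a == lim

def cellGet? {α : Type} (g : List (List α)) (i j : Int) : Option α :=
  if 0 ≤ i ∧ 0 ≤ j then (g[i.toNat]?).bind (fun r => r[j.toNat]?) else none

def setCell (v : List (List Bool)) (i j : Int) (b : Bool) : List (List Bool) :=
  if 0 ≤ i ∧ 0 ≤ j then v.modify i.toNat (fun r => r.set j.toNat b) else v

-- len(maze[x])
def rowLenI (maze : List (List String)) (x : Int) : Int :=
  ((if 0 ≤ x then maze[x.toNat]? else none).getD []).length

-- maze[i][j] != '#' and visited[i][j] == False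
def moveOk (maze : List (List String)) (v : List (List Bool)) (i j : Int) : Bool :=
  ((cellGet? maze i j).getD "#") != "#" && ((cellGet? v i j).getD true) == false

-- the `for k in range(4)` loop of A; j counts the remaining iterations (k = 4 - j)
def loopA (rec : Int → Int → List (List Bool) → Option (Bool × List (List Bool)))
    (maze : List (List String)) (x y : Int) :
    List (List Bool) → Nat → Option (Bool × List (List Bool))
  | v, 0 => some (false, setCell v x y false)
  | v, j + 1 =>
    let k := 3 - j
    let nx := x + XkD k
    let ny := y + YkD k
    if outB nx (maze.length : Int) || outB ny (rowLenI maze x) then some (true, v)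
    else if moveOk maze v nx ny then
      match rec nx ny v with
      | none => none
      | some (true, v') => some (true, setCell v' x y true)
      | some (false, v') => loopA rec maze x y v' j
    else loopA rec maze x y v j

-- A's recursive traverseMaze, with a fuel guard (the fuel 'cells + 1' below provably suffices)
def goA (maze : List (List String)) :
    Nat → Int → Int → List (List Bool) → Option (Bool × List (List Bool))
  | 0 => fun _ _ _ => none
  | f + 1 => fun x y v => loopA (goA maze f) maze x y (setCell v x y true) 4

def fuelFor (visited : List (List Bool)) : Nat := (visited.map List.length).sum + 1

def traverseMaze (maze : List (List String)) (x : Int) (y : Int) (visited : List (List Bool)) : Bool :=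
  match goA maze (fuelFor visited) x y visited with
  | some (r, _) => r
  | none => false

-- ===== PORT B =====
-- the while-loop of Source B over the explicit stack of (cell, next-direction) frames,
-- with a gas guard (the gas below provably suffices)
def runB (maze : List (List String)) :
    Nat → List (Int × Int × Nat) → List (List Bool) → Option (Bool × List (List Bool))
  | 0, s, v => match s with
    | [] => some (false, v)
    | _ :: _ => none
  | g + 1, s, v => match s with
    | [] => some (false, v)
    | (cx, cy, k) :: rest =>
      if 4 ≤ k then runB maze g rest (setCell v cx cy false)
      else
        let nx := cx + XkD k
        let ny := cy + YkD k
        if outB nx (maze.length : Int) || outB ny (rowLenI maze cx) then some (true, v)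
        else if moveOk maze v nx ny then
          runB maze g ((nx, ny, 0) :: (cx, cy, k + 1) :: rest) (setCell v nx ny true)
        else runB maze g ((cx, cy, k + 1) :: rest) v

def traverseMaze_alt (maze : List (List String)) (x : Int) (y : Int) (visited : List (List Bool)) : Bool :=
  match runB maze (9 ^ (fuelFor visited + 1)) [(x, y, 0)] (setCell visited x y true) with
  | some (r, _) => r
  | none => false

-- ===== PRECONDITION & SPEC =====
-- Pre_ admits (i) the regular case — nonempty rectangular maze, visited of the same shape,
-- in-range start — and (ii) the immediate-exit case, where visited[x][y] is assignable
-- (Python index semantics, wraparound included) and the very first neighbour check k=0 is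
-- already out of bounds, so A returns True before reading any other cell; outside both, A
-- either raises IndexError or its returned value relies on accidental shape compatibilities
-- of a ragged maze / mismatched visited (shape-validation territory), where B behaves
-- identically to A in Python anyway.
def Pre_traverseMaze (maze : List (List String)) (x : Int) (y : Int) (visited : List (List Bool)) : Prop :=
  (maze ≠ [] ∧
    (∀ row ∈ maze, row.length = maze.headI.length) ∧
    visited.length = maze.length ∧
    (∀ row ∈ visited, row.length = maze.headI.length) ∧
    0 ≤ x ∧ x < (maze.length : Int) ∧ 0 ≤ y ∧ y < (maze.headI.length : Int)) ∨
  (((PySem.List.pyGet? visited x).bind (fun row => PySem.List.pyGet? row y) ≠ none) ∧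
    (x < 0 ∨ x = (maze.length : Int) ∨
      (0 ≤ x ∧ x < (maze.length : Int) ∧ (y ≤ 0 ∨ y = rowLenI maze x + 1))))

instance (maze : List (List String)) (x : Int) (y : Int) (visited : List (List Bool)) :
    Decidable (Pre_traverseMaze maze x y visited) := by unfold Pre_traverseMaze; infer_instance

def pvWitness_traverseMaze : List (List String) × Int × Int × List (List Bool) :=
  ([[".", "#"], [".", "."]], 0, 1, [[false, false], [false, false]])

def Spec_traverseMaze (maze : List (List String)) (x : Int) (y : Int) (visited : List (List Bool)) (out : Bool) : Prop := out = traverseMaze_alt maze x y visited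
instance (maze : List (List String)) (x : Int) (y : Int) (visited : List (List Bool)) (out : Bool) : Decidable (Spec_traverseMaze maze x y visited out) := by unfold Spec_traverseMaze; infer_instance

-- ===== CLAIM (what is proved, stated in full; the proofs are below) =====
def Claim_equal_traverseMaze : Prop := ∀ (maze : List (List String)) (x : Int) (y : Int) (visited : List (List Bool)), Dom_traverseMaze maze x y visited → Pre_traverseMaze maze x y visited → Spec_traverseMaze maze x y visited (traverseMaze maze x y visited)

-- ===== LEMMAS AND PROOFS =====

-- ---- row-level list lemmas ----
lemma row_set_noop {α : Type} (r : List α) (j : Nat) (b : α) (h : r[j]? = some b) :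
    r.set j b = r := by
  induction r generalizing j with
  | nil => simp at h
  | cons a r ih =>
    cases j with
    | zero => simp_all
    | succ j => simp only [List.set_cons_succ]; rw [ih j (by simpa using h)]

lemma row_countP_set_true (r : List Bool) (j : Nat) (h : r[j]? = some false) :
    (r.set j true).countP (fun b => !b) + 1 = r.countP (fun b => !b) := by
  induction r generalizing j with
  | nil => simp at h
  | cons a r ih =>
    cases j with
    | zero =>
      simp only [List.getElem?_cons_zero, Option.some.injEq] at h
      subst h; simp [List.countP_cons]
    | succ j =>
      simp only [List.getElem?_cons_succ] at h
      simp only [List.set_cons_succ, List.countP_cons]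
      have := ih j h
      omega


-- ---- grid-level lemmas about cellGet? / setCell ----
lemma cellGet?_some_nonneg {α : Type} (g : List (List α)) (i j : Int) (c : α)
    (h : cellGet? g i j = some c) : 0 ≤ i ∧ 0 ≤ j := by
  by_cases hg : 0 ≤ i ∧ 0 ≤ j
  · exact hg
  · unfold cellGet? at h; rw [if_neg hg] at h; simp at h

lemma cellGet?_setCell_self (v : List (List Bool)) (i j : Int) (c b : Bool)
    (h : cellGet? v i j = some c) : cellGet? (setCell v i j b) i j = some b := by
  obtain ⟨hi, hj⟩ := cellGet?_some_nonneg v i j c h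
  unfold cellGet? setCell at *
  rw [if_pos ⟨hi, hj⟩] at h ⊢
  cases hr : v[i.toNat]? with
  | none => rw [hr] at h; simp at h
  | some r =>
    rw [hr] at h
    simp only [Option.bind_some] at h
    have hlt : j.toNat < r.length := (List.getElem?_eq_some_iff.mp h).1
    rw [if_pos ⟨hi, hj⟩, List.getElem?_modify, hr]
    simp [List.getElem?_set, hlt]

lemma setCell_noop (v : List (List Bool)) (i j : Int) (b : Bool)
    (h : cellGet? v i j = some b) : setCell v i j b = v := by
  by_cases hg : 0 ≤ i ∧ 0 ≤ j
  · unfold cellGet? at h; rw [if_pos hg] at h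
    cases hr : v[i.toNat]? with
    | none => rw [hr] at h; simp at h
    | some r =>
      rw [hr] at h
      simp only [Option.bind_some] at h
      unfold setCell
      rw [if_pos hg]
      apply List.ext_getElem?
      intro n
      rw [List.getElem?_modify]
      by_cases hn : i.toNat = n
      · subst hn; rw [hr]; simp [row_set_noop r j.toNat b h]
      · cases hv : v[n]? <;> simp [hn]
  · unfold cellGet? at h; rw [if_neg hg] at h; simp at h

lemma setCell_setCell (v : List (List Bool)) (i j : Int) (a b : Bool) :
    setCell (setCell v i j a) i j b = setCell v i j b := by
  by_cases hg : 0 ≤ i ∧ 0 ≤ j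
  · unfold setCell
    rw [if_pos hg, if_pos hg, if_pos hg]
    apply List.ext_getElem?
    intro n
    rw [List.getElem?_modify, List.getElem?_modify, List.getElem?_modify]
    by_cases hn : i.toNat = n
    · cases hv : v[n]? <;> simp [hn, List.set_set]
    · cases hv : v[n]? <;> simp [hn]
  · unfold setCell; rw [if_neg hg, if_neg hg, if_neg hg]

lemma cellGet?_setCell_true_preserve (v : List (List Bool)) (i j p q : Int)
    (h : cellGet? v p q = some true) : cellGet? (setCell v i j true) p q = some true := by
  obtain ⟨hp, hq⟩ := cellGet?_some_nonneg v p q true h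
  unfold cellGet? setCell at *
  rw [if_pos ⟨hp, hq⟩] at h ⊢
  by_cases hg : 0 ≤ i ∧ 0 ≤ j
  · rw [if_pos hg]
    cases hr : v[p.toNat]? with
    | none => rw [hr] at h; simp at h
    | some r =>
      rw [hr] at h
      simp only [Option.bind_some] at h
      rw [List.getElem?_modify, hr]
      by_cases hn : i.toNat = p.toNat
      · rw [hn]
        simp only [if_true, eq_self_iff_true, Option.map_some, Option.bind_some]
        show (r.set j.toNat true)[q.toNat]? = some true
        rw [List.getElem?_set]
        by_cases hm : j.toNat = q.toNat
        · have hlt : q.toNat < r.length := (List.getElem?_eq_some_iff.mp h).1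
          rw [hm] at *
          simp [hlt]
        · simp [hm, h]
      · simp [hn, h]
  · rw [if_neg hg]; exact h

-- ---- counting lemmas (for the fuel bound) ----
def falseCount (v : List (List Bool)) : Nat := (v.map (fun r => r.countP (fun b => !b))).sum

def sizeSum (v : List (List Bool)) : Nat := (v.map List.length).sum

lemma fc_modify_aux :
    ∀ (v : List (List Bool)) (n jn : Nat), (v[n]?.bind (fun r => r[jn]?)) = some false →
      falseCount (v.modify n (fun r => r.set jn true)) + 1 = falseCount v := by
  intro v
  induction v with
  | nil => intro n jn h; simp at h
  | cons a l ih =>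
    intro n jn h
    cases n with
    | zero =>
      simp only [List.getElem?_cons_zero, Option.bind_some] at h
      simp only [List.modify_zero_cons, falseCount, List.map_cons, List.sum_cons]
      have := row_countP_set_true a jn h
      omega
    | succ n =>
      simp only [List.getElem?_cons_succ] at h
      have := ih n jn h
      simp only [falseCount, List.map_cons, List.sum_cons, List.modify_succ_cons] at *
      omega

lemma sz_modify_aux :
    ∀ (v : List (List Bool)) (n jn : Nat) (b : Bool),
      sizeSum (v.modify n (fun r => r.set jn b)) = sizeSum v := by
  intro v
  induction v with
  | nil => intro n jn b; simp
  | cons a l ih =>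
    intro n jn b
    cases n with
    | zero =>
      simp only [sizeSum, List.map_cons, List.sum_cons, List.modify_zero_cons, List.length_set]
    | succ n =>
      have := ih n jn b
      simp only [sizeSum, List.map_cons, List.sum_cons, List.modify_succ_cons] at *
      omega

lemma falseCount_le_sizeSum (v : List (List Bool)) : falseCount v ≤ sizeSum v := by
  induction v with
  | nil => simp [falseCount, sizeSum]
  | cons a l ih =>
    simp only [falseCount, sizeSum, List.map_cons, List.sum_cons] at *
    have := List.countP_le_length (p := fun b => !b) (l := a)
    omega

lemma sizeSum_setCell (v : List (List Bool)) (i j : Int) (b : Bool) :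
    sizeSum (setCell v i j b) = sizeSum v := by
  unfold setCell
  by_cases hg : 0 ≤ i ∧ 0 ≤ j
  · rw [if_pos hg]; exact sz_modify_aux v i.toNat j.toNat b
  · rw [if_neg hg]

lemma falseCount_setCell_true (v : List (List Bool)) (i j : Int)
    (h : cellGet? v i j = some false) :
    falseCount (setCell v i j true) + 1 = falseCount v := by
  obtain ⟨hi, hj⟩ := cellGet?_some_nonneg v i j false h
  unfold cellGet? at h
  rw [if_pos ⟨hi, hj⟩] at h
  unfold setCell
  rw [if_pos ⟨hi, hj⟩]
  exact fc_modify_aux v i.toNat j.toNat h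

lemma moveOk_visited_false (maze : List (List String)) (v : List (List Bool)) (i j : Int)
    (h : moveOk maze v i j = true) : cellGet? v i j = some false := by
  unfold moveOk at h
  cases hc : cellGet? v i j with
  | none => rw [hc] at h; simp at h
  | some b => rw [hc] at h; cases b <;> simp_all

-- ---- restoration: a failing call leaves `visited` exactly as it found it ----
lemma loop_restore (maze : List (List String))
    (rec : Int → Int → List (List Bool) → Option (Bool × List (List Bool)))
    (hrec : ∀ a b w w', rec a b w = some (false, w') → cellGet? w a b = some false → w' = w) :
    ∀ j x y v v₁, loopA rec maze x y v j = some (false, v₁) → v₁ = setCell v x y false := by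
  intro j
  induction j with
  | zero =>
    intro x y v v₁ h
    simp only [loopA, Option.some.injEq, Prod.mk.injEq, true_and] at h
    exact h.symm
  | succ j ih =>
    intro x y v v₁ h
    simp only [loopA] at h
    split at h
    · simp at h
    · split at h
      · rename_i hmv
        rcases hcall : rec (x + XkD (3 - j)) (y + YkD (3 - j)) v with _ | ⟨b, v'⟩
        · rw [hcall] at h; simp at h
        · rw [hcall] at h
          cases b
          · have hv' : v' = v :=
              hrec _ _ _ _ hcall (moveOk_visited_false maze v _ _ hmv)
            rw [hv'] at h
            exact ih x y v v₁ h
          · simp at h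
      · exact ih x y v v₁ h

lemma go_restore (maze : List (List String)) :
    ∀ f x y v v₁, goA maze f x y v = some (false, v₁) → v₁ = setCell v x y false := by
  intro f
  induction f with
  | zero => intro x y v v₁ h; simp [goA] at h
  | succ f ih =>
    intro x y v v₁ h
    simp only [goA] at h
    have := loop_restore maze (goA maze f)
      (fun a b w w' hw hc => (ih a b w w' hw).trans (setCell_noop w a b false hc))
      4 x y (setCell v x y true) v₁ h
    rw [this, setCell_setCell]

lemma go_restore' (maze : List (List String)) (f : Nat) (a b : Int) (w w' : List (List Bool))
    (h : goA maze f a b w = some (false, w')) (hc : cellGet? w a b = some false) : w' = w := by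
  exact (go_restore maze f a b w w' h).trans (setCell_noop w a b false hc)

-- ---- preservation: a successful call keeps every previously-True cell True ----
lemma loop_preserve (maze : List (List String))
    (rec : Int → Int → List (List Bool) → Option (Bool × List (List Bool)))
    (hT : ∀ a b w w', rec a b w = some (true, w') →
      ∀ p q, cellGet? w p q = some true → cellGet? w' p q = some true)
    (hF : ∀ a b w w', rec a b w = some (false, w') → cellGet? w a b = some false → w' = w) :
    ∀ j x y v v₁, loopA rec maze x y v j = some (true, v₁) →
      ∀ p q, cellGet? v p q = some true → cellGet? v₁ p q = some true := by
  intro j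
  induction j with
  | zero => intro x y v v₁ h; simp [loopA] at h
  | succ j ih =>
    intro x y v v₁ h p q hpq
    simp only [loopA] at h
    split at h
    · simp only [Option.some.injEq, Prod.mk.injEq, true_and] at h
      rw [← h]; exact hpq
    · split at h
      · rename_i hmv
        rcases hcall : rec (x + XkD (3 - j)) (y + YkD (3 - j)) v with _ | ⟨b, v'⟩
        · rw [hcall] at h; simp at h
        · rw [hcall] at h
          cases b
          · have hv' : v' = v :=
              hF _ _ _ _ hcall (moveOk_visited_false maze v _ _ hmv)
            rw [hv'] at h
            exact ih x y v v₁ h p q hpq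
          · simp only [Option.some.injEq, Prod.mk.injEq, true_and] at h
            rw [← h]
            exact cellGet?_setCell_true_preserve _ x y p q (hT _ _ _ _ hcall p q hpq)
      · exact ih x y v v₁ h p q hpq

lemma go_preserve (maze : List (List String)) :
    ∀ f x y v v₁, goA maze f x y v = some (true, v₁) →
      ∀ p q, cellGet? v p q = some true → cellGet? v₁ p q = some true := by
  intro f
  induction f with
  | zero => intro x y v v₁ h; simp [goA] at h
  | succ f ih =>
    intro x y v v₁ h p q hpq
    simp only [goA] at h
    exact loop_preserve maze (goA maze f) ih
      (fun a b w w' hw hc => (go_restore maze f a b w w' hw).trans (setCell_noop w a b false hc))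
      4 x y (setCell v x y true) v₁ h p q
      (cellGet?_setCell_true_preserve v x y p q hpq)

-- ---- totality of A's port for the chosen fuel ----
lemma loop_total (maze : List (List String))
    (rec : Int → Int → List (List Bool) → Option (Bool × List (List Bool))) (f : Nat)
    (hrecT : ∀ a b w, 0 ≤ a → 0 ≤ b → cellGet? w a b = some false → falseCount w ≤ f →
      ∃ out, rec a b w = some out)
    (hF : ∀ a b w w', rec a b w = some (false, w') → cellGet? w a b = some false → w' = w) :
    ∀ j x y v, falseCount v ≤ f → ∃ out, loopA rec maze x y v j = some out := by
  intro j
  induction j with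
  | zero => intro x y v _; exact ⟨_, rfl⟩
  | succ j ih =>
    intro x y v hv
    simp only [loopA]
    split
    · exact ⟨_, rfl⟩
    · split
      · rename_i hoob hmv
        have hcell := moveOk_visited_false maze v _ _ hmv
        have hnn : 0 ≤ x + XkD (3 - j) ∧ 0 ≤ y + YkD (3 - j) := by
          have hoob' : (outB (x + XkD (3 - j)) (maze.length : Int) ||
              outB (y + YkD (3 - j)) (rowLenI maze x)) = false := by
            simpa using hoob
          simp only [outB, Bool.or_eq_false_iff, decide_eq_false_iff_not] at hoob'
          exact ⟨not_lt.mp hoob'.1.1, not_lt.mp hoob'.2.1⟩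
        obtain ⟨⟨b, v'⟩, hout⟩ := hrecT _ _ v hnn.1 hnn.2 hcell hv
        rw [hout]
        cases b
        · have hv' : v' = v := hF _ _ _ _ hout hcell
          rw [hv']
          exact ih x y v hv
        · exact ⟨_, rfl⟩
      · exact ih x y v hv

lemma go_total (maze : List (List String)) :
    ∀ f x y v, falseCount (setCell v x y true) < f → ∃ out, goA maze f x y v = some out := by
  intro f
  induction f with
  | zero => intro x y v h; omega
  | succ f ih =>
    intro x y v h
    simp only [goA]
    apply loop_total maze (goA maze f) f
    · intro a b w ha hb hc hw
      apply ih
      have := falseCount_setCell_true w a b hc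
      omega
    · exact fun a b w w' hw hc => go_restore' maze f a b w w' hw hc
    · omega

-- ---- gas machinery for B's port ----
lemma runB_mono (maze : List (List String)) :
    ∀ g s v r, runB maze g s v = some r → runB maze (g + 1) s v = some r := by
  intro g
  induction g with
  | zero =>
    intro s v r h
    cases s with
    | nil => simpa [runB] using h
    | cons fr rest => simp [runB] at h
  | succ g ih =>
    intro s v r h
    cases s with
    | nil => simpa [runB] using h
    | cons fr rest =>
      obtain ⟨cx, cy, k⟩ := fr
      simp only [runB] at h ⊢
      split
      · rename_i hk
        rw [if_pos hk] at h
        exact ih _ _ _ h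
      · rename_i hk
        rw [if_neg hk] at h
        split
        · rename_i hoob
          rw [if_pos hoob] at h
          exact h
        · rename_i hoob
          rw [if_neg hoob] at h
          split
          · rename_i hmv
            rw [if_pos hmv] at h
            exact ih _ _ _ h
          · rename_i hmv
            rw [if_neg hmv] at h
            exact ih _ _ _ h

lemma runB_mono_le (maze : List (List String)) (g g' : Nat) (h : g ≤ g')
    (s : List (Int × Int × Nat)) (v : List (List Bool)) (r : Bool × List (List Bool))
    (hr : runB maze g s v = some r) : runB maze g' s v = some r := by
  obtain ⟨d, rfl⟩ := Nat.exists_eq_add_of_le h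
  clear h
  induction d with
  | zero => exact hr
  | succ d ih =>
    have : g + (d + 1) = (g + d) + 1 := by omega
    rw [this]
    exact runB_mono maze _ _ _ _ ih

lemma runB_append_false (maze : List (List String)) :
    ∀ g F v v₁, runB maze g F v = some (false, v₁) →
      ∀ rest g₂ res, runB maze g₂ rest v₁ = some res →
        runB maze (g + g₂) (F ++ rest) v = some res := by
  intro g
  induction g with
  | zero =>
    intro F v v₁ h rest g₂ res h₂
    cases F with
    | nil =>
      simp only [runB, Option.some.injEq, Prod.mk.injEq, true_and] at h
      rw [← h] at h₂
      simp only [List.nil_append, Nat.zero_add]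
      exact h₂
    | cons fr F' => simp [runB] at h
  | succ g ih =>
    intro F v v₁ h rest g₂ res h₂
    cases F with
    | nil =>
      simp only [runB, Option.some.injEq, Prod.mk.injEq, true_and] at h
      rw [← h] at h₂
      simp only [List.nil_append]
      exact runB_mono_le maze g₂ (g + 1 + g₂) (by omega) rest v res h₂
    | cons fr F' =>
      obtain ⟨cx, cy, k⟩ := fr
      have hgas : g + 1 + g₂ = (g + g₂) + 1 := by omega
      rw [hgas, List.cons_append]
      simp only [runB] at h ⊢
      split
      · rename_i hk
        rw [if_pos hk] at h
        exact ih _ _ _ h rest g₂ res h₂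
      · rename_i hk
        rw [if_neg hk] at h
        split
        · rename_i hoob
          rw [if_pos hoob] at h
          simp at h
        · rename_i hoob
          rw [if_neg hoob] at h
          split
          · rename_i hmv
            rw [if_pos hmv] at h
            have := ih _ _ _ h rest g₂ res h₂
            simpa [List.cons_append] using this
          · rename_i hmv
            rw [if_neg hmv] at h
            have := ih _ _ _ h rest g₂ res h₂
            simpa [List.cons_append] using this

lemma runB_append_true (maze : List (List String)) :
    ∀ g F v v₁, runB maze g F v = some (true, v₁) →
      ∀ rest, runB maze g (F ++ rest) v = some (true, v₁) := by
  intro g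
  induction g with
  | zero =>
    intro F v v₁ h rest
    cases F with
    | nil => simp [runB] at h
    | cons fr F' => simp [runB] at h
  | succ g ih =>
    intro F v v₁ h rest
    cases F with
    | nil => simp [runB] at h
    | cons fr F' =>
      obtain ⟨cx, cy, k⟩ := fr
      rw [List.cons_append]
      simp only [runB] at h ⊢
      split
      · rename_i hk
        rw [if_pos hk] at h
        exact ih _ _ _ h rest
      · rename_i hk
        rw [if_neg hk] at h
        split
        · rename_i hoob
          rw [if_pos hoob] at h
          exact h
        · rename_i hoob
          rw [if_neg hoob] at h
          split
          · rename_i hmv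
            rw [if_pos hmv] at h
            have := ih _ _ _ h rest
            simpa [List.cons_append] using this
          · rename_i hmv
            rw [if_neg hmv] at h
            have := ih _ _ _ h rest
            simpa [List.cons_append] using this

-- ---- the simulation: B's stack machine computes exactly A's result ----
lemma loop_sim (maze : List (List String)) (f : Nat)
    (hgo : ∀ a b w res, cellGet? w a b ≠ none → goA maze f a b w = some res →
      ∃ g, g ≤ 9 ^ (f + 1) ∧ runB maze g [(a, b, 0)] (setCell w a b true) = some res) :
    ∀ j, j ≤ 4 → ∀ x y v r v₁ rest,
      loopA (goA maze f) maze x y v j = some (r, v₁) → cellGet? v x y = some true →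
      (r = true → ∃ g, g ≤ j * (1 + 9 ^ (f + 1)) + 1 ∧
        runB maze g ((x, y, 4 - j) :: rest) v = some (true, v₁)) ∧
      (r = false → ∀ g₂ res, runB maze g₂ rest v₁ = some res →
        ∃ g, g ≤ j * (1 + 9 ^ (f + 1)) + 1 + g₂ ∧
          runB maze g ((x, y, 4 - j) :: rest) v = some res) := by
  intro j
  induction j with
  | zero =>
    intro _ x y v r v₁ rest h hx
    simp only [loopA, Option.some.injEq, Prod.mk.injEq] at h
    constructor
    · intro hrt; rw [hrt] at h; simp at h
    · intro _ g₂ res h₂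
      refine ⟨g₂ + 1, by omega, ?_⟩
      simp only [runB, Nat.sub_zero]
      rw [if_pos (by omega : 4 ≤ 4), h.2]
      exact h₂
  | succ j ihj =>
    intro hj x y v r v₁ rest h hx
    have hj4 : j ≤ 4 := by omega
    have hk4 : ¬ (4 ≤ 4 - (j + 1)) := by omega
    have he : 4 - (j + 1) = 3 - j := by omega
    have he2 : 3 - j + 1 = 4 - j := by omega
    have hP : 1 ≤ 9 ^ (f + 1) := Nat.one_le_pow _ _ (by omega)
    have hA : (j + 1) * (1 + 9 ^ (f + 1)) = j * (1 + 9 ^ (f + 1)) + (1 + 9 ^ (f + 1)) := by ring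
    simp only [loopA] at h
    split at h
    · -- out of bounds: immediate True
      rename_i hoob
      simp only [Option.some.injEq, Prod.mk.injEq] at h
      obtain ⟨hr, hv⟩ := h
      constructor
      · intro _
        refine ⟨1, by omega, ?_⟩
        simp only [runB]
        rw [if_neg hk4, he, if_pos hoob, hv]
      · intro hrf
        rw [← hr] at hrf
        simp at hrf
    · rename_i hoob
      split at h
      · -- viable neighbour: A recurses, B pushes
        rename_i hmv
        have hcellv := moveOk_visited_false maze v _ _ hmv
        rcases hcall : goA maze f (x + XkD (3 - j)) (y + YkD (3 - j)) v with _ | ⟨b, v'⟩ <;>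
          rw [hcall] at h
        · simp at h
        · have hne : cellGet? v (x + XkD (3 - j)) (y + YkD (3 - j)) ≠ none := by
            rw [hcellv]; simp
          obtain ⟨gc, hgc, hrunc⟩ := hgo _ _ v (b, v') hne hcall
          cases b with
          | true =>
            simp only [Option.some.injEq, Prod.mk.injEq] at h
            obtain ⟨hr, hv⟩ := h
            have hv'x : cellGet? v' x y = some true :=
              go_preserve maze f _ _ v v' hcall x y hx
            have hv₁ : v₁ = v' := by rw [← hv, setCell_noop v' x y true hv'x]
            constructor
            · intro _
              refine ⟨gc + 1, by omega, ?_⟩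
              simp only [runB]
              rw [if_neg hk4, he, if_neg hoob, if_pos hmv, he2, hv₁]
              have := runB_append_true maze gc [(_, _, 0)] (setCell v _ _ true) v' hrunc
                ((x, y, 4 - j) :: rest)
              simpa using this
            · intro hrf
              rw [← hr] at hrf
              simp at hrf
          | false =>
            have h' : loopA (goA maze f) maze x y v' j = some (r, v₁) := h
            have hveq : v' = v := go_restore' maze f _ _ v v' hcall hcellv
            rw [hveq] at hrunc h'
            have ih := ihj hj4 x y v r v₁ rest h' hx
            constructor
            · intro hrt
              obtain ⟨g₂', hb2, hrun2⟩ := ih.1 hrt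
              refine ⟨gc + g₂' + 1, by omega, ?_⟩
              simp only [runB]
              rw [if_neg hk4, he, if_neg hoob, if_pos hmv, he2]
              have := runB_append_false maze gc [(_, _, 0)] (setCell v _ _ true) v hrunc
                ((x, y, 4 - j) :: rest) g₂' (true, v₁) hrun2
              simpa using this
            · intro hrf g₂ res h₂
              obtain ⟨g₂', hb2, hrun2⟩ := ih.2 hrf g₂ res h₂
              refine ⟨gc + g₂' + 1, by omega, ?_⟩
              simp only [runB]
              rw [if_neg hk4, he, if_neg hoob, if_pos hmv, he2]
              have := runB_append_false maze gc [(_, _, 0)] (setCell v _ _ true) v hrunc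
                ((x, y, 4 - j) :: rest) g₂' res hrun2
              simpa using this
      · -- blocked neighbour: both just advance
        rename_i hmv
        have ih := ihj hj4 x y v r v₁ rest h hx
        constructor
        · intro hrt
          obtain ⟨g₂', hb2, hrun2⟩ := ih.1 hrt
          refine ⟨g₂' + 1, by omega, ?_⟩
          simp only [runB]
          rw [if_neg hk4, he, if_neg hoob, if_neg hmv, he2]
          exact hrun2
        · intro hrf g₂ res h₂
          obtain ⟨g₂', hb2, hrun2⟩ := ih.2 hrf g₂ res h₂
          refine ⟨g₂' + 1, by omega, ?_⟩
          simp only [runB]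
          rw [if_neg hk4, he, if_neg hoob, if_neg hmv, he2]
          exact hrun2

lemma go_sim (maze : List (List String)) :
    ∀ f x y v res, cellGet? v x y ≠ none → goA maze f x y v = some res →
      ∃ g, g ≤ 9 ^ (f + 1) ∧ runB maze g [(x, y, 0)] (setCell v x y true) = some res := by
  intro f
  induction f with
  | zero => intro x y v res hne h; simp [goA] at h
  | succ f ih =>
    intro x y v res hne h
    simp only [goA] at h
    obtain ⟨c, hc⟩ : ∃ c, cellGet? v x y = some c := by
      cases hcv : cellGet? v x y with
      | none => exact absurd hcv hne
      | some c => exact ⟨c, rfl⟩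
    have hx : cellGet? (setCell v x y true) x y = some true :=
      cellGet?_setCell_self v x y c true hc
    obtain ⟨r, v₁⟩ := res
    have hP : 1 ≤ 9 ^ (f + 1) := Nat.one_le_pow _ _ (by omega)
    have hpow : 9 ^ (f + 1 + 1) = 9 ^ (f + 1) * 9 := by rw [pow_succ]
    have hsim := loop_sim maze f ih 4 (by omega) x y (setCell v x y true) r v₁ [] h hx
    cases r with
    | true =>
      obtain ⟨g, hg, hrun⟩ := hsim.1 rfl
      refine ⟨g, by omega, ?_⟩
      simpa using hrun
    | false =>
      obtain ⟨g, hg, hrun⟩ := hsim.2 rfl 0 (false, v₁) rfl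
      refine ⟨g, by omega, ?_⟩
      simpa using hrun

-- ===== VERDICT (by name: the statement is the Claim_ definition above) =====
theorem traverseMaze_spec : Claim_equal_traverseMaze := by
  unfold Claim_equal_traverseMaze
  intro maze x y visited hdom hpre
  unfold Spec_traverseMaze
  rcases hpre with hpre | ⟨_, hcase⟩
  case inr =>
    -- immediate-exit case: the k = 0 bounds check fires at once in both ports
    have hcond : (outB (x + XkD 0) (maze.length : Int) || outB (y + YkD 0) (rowLenI maze x)) = true := by
      simp only [XkD, YkD, outB, Bool.or_eq_true, decide_eq_true_eq, beq_iff_eq]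
      rcases hcase with h | h | ⟨h1, h2, h3⟩
      · left; left; omega
      · left; right; omega
      · right
        rcases h3 with h3 | h3
        · left; omega
        · right; omega
    have hA : traverseMaze maze x y visited = true := by
      unfold traverseMaze fuelFor
      simp only [goA]
      rw [show (4 : Nat) = 3 + 1 from rfl]
      simp only [loopA, Nat.sub_self]
      rw [if_pos hcond]
    have hB : traverseMaze_alt maze x y visited = true := by
      unfold traverseMaze_alt
      obtain ⟨G, hG⟩ : ∃ G, 9 ^ (fuelFor visited + 1) = G + 1 :=
        ⟨9 ^ (fuelFor visited + 1) - 1, by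
          have := Nat.one_le_pow (fuelFor visited + 1) 9 (by omega); omega⟩
      rw [hG]
      simp only [runB]
      rw [if_neg (by omega : ¬ (4 ≤ 0)), if_pos hcond]
    rw [hA, hB]
  obtain ⟨hnil, hmrows, hvlen, hvrows, hx0, hxlt, hy0, hylt⟩ := hpre
  have hxn : x.toNat < visited.length := by omega
  have hrlen : visited[x.toNat].length = maze.headI.length :=
    hvrows _ (List.getElem_mem hxn)
  have hyn : y.toNat < visited[x.toNat].length := by omega
  have hcell : cellGet? visited x y = some (visited[x.toNat][y.toNat]) := by
    unfold cellGet?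
    rw [if_pos ⟨hx0, hy0⟩, List.getElem?_eq_getElem hxn]
    simp [List.getElem?_eq_getElem hyn]
  have hne : cellGet? visited x y ≠ none := by rw [hcell]; simp
  have htot : ∃ out, goA maze (fuelFor visited) x y visited = some out := by
    apply go_total
    have h1 := falseCount_le_sizeSum (setCell visited x y true)
    have h2 := sizeSum_setCell visited x y true
    unfold fuelFor
    unfold sizeSum at h1 h2
    omega
  obtain ⟨⟨r, w⟩, hgo⟩ := htot
  obtain ⟨g, hg, hrun⟩ := go_sim maze (fuelFor visited) x y visited (r, w) hne hgo
  have hrunG := runB_mono_le maze g (9 ^ (fuelFor visited + 1)) hg _ _ _ hrun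
  unfold traverseMaze traverseMaze_alt
  rw [hgo, hrunG]
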